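-- pv_equiv track=rewrite | github.com/CelinZiad/490-10-Classes-Scheduler | timetable-algo/genetic_algo/replacement.py | elitist_replacement
-- ===== SOURCE A (Python) =====
-- def elitist_replacement(population, fitness_scores, offspring_list, offspring_fitness_scores):
--     """Replace individuals only if offspring have better fitness (elitist strategy)."""
--     n = len(offspring_list)
--
--     if n == 0:
--         return population, fitness_scores
--
--     indexed_population = [(i, fitness_scores[i], population[i]) for i in range(len(population))]
--     sorted_population = sorted(indexed_population, key=lambda x: x[1])
--
--     new_population = population.copy()
--     new_fitness_scores = fitness_scores.copy()
--
--     replacements = 0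
--     for i in range(n):
--         worst_idx, worst_fitness, _ = sorted_population[i]
--
--         if offspring_fitness_scores[i] > worst_fitness:
--             new_population[worst_idx] = offspring_list[i]
--             new_fitness_scores[worst_idx] = offspring_fitness_scores[i]
--             replacements += 1
--
--     return new_population, new_fitness_scores
-- ===== SOURCE B (Python) =====
-- def elitist_replacement(population, fitness_scores, offspring_list, offspring_fitness_scores):
--     """Elitist replacement without sorting: repeatedly pick the worst remaining
--     individual (lowest original fitness, ties broken by lowest index) and let
--     offspring i replace it if strictly fitter."""
--     n = len(offspring_list)
--
--     if n == 0:
--         return population, fitness_scores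
--
--     new_population = population.copy()
--     new_fitness_scores = fitness_scores.copy()
--
--     used = [False] * len(population)
--     for i in range(n):
--         worst = -1
--         for j in range(len(population)):
--             if not used[j] and (worst < 0 or fitness_scores[j] < fitness_scores[worst]):
--                 worst = j
--         used[worst] = True
--         if offspring_fitness_scores[i] > fitness_scores[worst]:
--             new_population[worst] = offspring_list[i]
--             new_fitness_scores[worst] = offspring_fitness_scores[i]
--
--     return new_population, new_fitness_scores
-- ===== Notes on version B (the rewrite author's own statement) =====
-- stated objective: alternative
-- what changed: Replaces the sort of (index,fitness,individual) triples by repeated selection: a used-flag array and, per offspring, a linear scan for the unused index with minimum original fitness (strict <, first found), which reproduces the stable sort's tie-breaking without ever sorting.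
import Mathlib
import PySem

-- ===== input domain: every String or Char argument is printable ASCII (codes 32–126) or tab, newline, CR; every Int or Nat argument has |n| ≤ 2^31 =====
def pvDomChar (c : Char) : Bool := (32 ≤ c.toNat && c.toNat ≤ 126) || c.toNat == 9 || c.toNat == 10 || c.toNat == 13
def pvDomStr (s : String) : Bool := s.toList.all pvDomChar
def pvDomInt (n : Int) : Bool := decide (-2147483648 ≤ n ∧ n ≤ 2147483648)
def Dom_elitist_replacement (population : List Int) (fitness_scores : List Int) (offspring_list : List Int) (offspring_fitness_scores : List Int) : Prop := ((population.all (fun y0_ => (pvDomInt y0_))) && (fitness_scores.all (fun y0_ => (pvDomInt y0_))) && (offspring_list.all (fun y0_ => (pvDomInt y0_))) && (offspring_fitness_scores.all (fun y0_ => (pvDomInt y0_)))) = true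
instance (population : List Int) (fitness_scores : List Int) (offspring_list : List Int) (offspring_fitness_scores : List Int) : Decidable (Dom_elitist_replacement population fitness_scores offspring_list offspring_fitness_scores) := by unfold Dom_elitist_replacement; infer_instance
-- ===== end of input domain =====

-- B replaces A's sort of (index, fitness, individual) triples by repeated selection of the
-- worst remaining index (ties to the lowest index) with a used-flag array: alternative
-- decomposition, no sorting; return-value equivalence (A mutates nothing shared).

-- ===== PORT A =====
-- loop body of A's 'for i in range(n)'; state = (new_population, new_fitness_scores, replacements)
def elitist_body_A (sorted_population : List (Int × Int × Int))
    (offspring_list offspring_fitness_scores : List Int)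
    (st : List Int × List Int × Int) (i : Nat) : List Int × List Int × Int :=
  let worst := PySem.List.pyGetD sorted_population ((i : Nat) : Int) (0, 0, 0)
  if PySem.List.pyGetD offspring_fitness_scores ((i : Nat) : Int) 0 > worst.2.1 then
    (PySem.List.pySetD st.1 worst.1 (PySem.List.pyGetD offspring_list ((i : Nat) : Int) 0),
     PySem.List.pySetD st.2.1 worst.1 (PySem.List.pyGetD offspring_fitness_scores ((i : Nat) : Int) 0),
     st.2.2 + 1)
  else st

def elitist_replacement (population : List Int) (fitness_scores : List Int) (offspring_list : List Int) (offspring_fitness_scores : List Int) : List Int × List Int :=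
  let n := offspring_list.length
  if n = 0 then (population, fitness_scores)
  else
    let indexed_population := (List.range population.length).map
      (fun i => (((i : Nat) : Int), PySem.List.pyGetD fitness_scores ((i : Nat) : Int) 0,
                 PySem.List.pyGetD population ((i : Nat) : Int) 0))
    let sorted_population := PySem.List.sorted indexed_population (fun x => x.2.1)
    let res := (List.range n).foldl
      (elitist_body_A sorted_population offspring_list offspring_fitness_scores)
      (population, fitness_scores, 0)
    (res.1, res.2.1)

-- ===== PORT B =====
-- inner scan of Source B: first unused index with minimal original fitness (strict <), -1 if none
def elitist_scan (fitness_scores : List Int) (used : List Bool) (m : Nat) : Int :=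
  (List.range m).foldl
    (fun w j =>
      if !(used.getD j false) &&
         (decide (w < 0) || decide (PySem.List.pyGetD fitness_scores ((j : Nat) : Int) 0 <
                                    PySem.List.pyGetD fitness_scores w 0)) then
        ((j : Nat) : Int)
      else w)
    (-1)

-- loop body of B's 'for i in range(n)'; state = (new_population, new_fitness_scores, used)
def elitist_body_B (population fitness_scores offspring_list offspring_fitness_scores : List Int)
    (st : List Int × List Int × List Bool) (i : Nat) : List Int × List Int × List Bool :=
  let worst := elitist_scan fitness_scores st.2.2 population.length
  let used := PySem.List.pySetD st.2.2 worst true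
  if PySem.List.pyGetD offspring_fitness_scores ((i : Nat) : Int) 0 >
     PySem.List.pyGetD fitness_scores worst 0 then
    (PySem.List.pySetD st.1 worst (PySem.List.pyGetD offspring_list ((i : Nat) : Int) 0),
     PySem.List.pySetD st.2.1 worst (PySem.List.pyGetD offspring_fitness_scores ((i : Nat) : Int) 0),
     used)
  else (st.1, st.2.1, used)

def elitist_replacement_alt (population : List Int) (fitness_scores : List Int) (offspring_list : List Int) (offspring_fitness_scores : List Int) : List Int × List Int :=
  let n := offspring_list.length
  if n = 0 then (population, fitness_scores)
  else
    let res := (List.range n).foldl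
      (elitist_body_B population fitness_scores offspring_list offspring_fitness_scores)
      (population, fitness_scores, List.replicate population.length false)
    (res.1, res.2.1)

-- ===== PRECONDITION & SPEC =====
-- Pre_ is exactly where the Python A returns: with offspring present A raises IndexError when
-- there are more offspring than individuals, when fitness_scores is shorter than population,
-- or when offspring_fitness_scores is shorter than offspring_list.
def Pre_elitist_replacement (population : List Int) (fitness_scores : List Int) (offspring_list : List Int) (offspring_fitness_scores : List Int) : Prop :=
  offspring_list = [] ∨
    (offspring_list.length ≤ population.length ∧
     population.length ≤ fitness_scores.length ∧
     offspring_list.length ≤ offspring_fitness_scores.length)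
instance (population : List Int) (fitness_scores : List Int) (offspring_list : List Int) (offspring_fitness_scores : List Int) : Decidable (Pre_elitist_replacement population fitness_scores offspring_list offspring_fitness_scores) := by unfold Pre_elitist_replacement; infer_instance

def pvWitness_elitist_replacement : List Int × List Int × List Int × List Int :=
  ([5, 6], [1, 2], [9], [3])

def Spec_elitist_replacement (population : List Int) (fitness_scores : List Int) (offspring_list : List Int) (offspring_fitness_scores : List Int) (out : List Int × List Int) : Prop := out = elitist_replacement_alt population fitness_scores offspring_list offspring_fitness_scores
instance (population : List Int) (fitness_scores : List Int) (offspring_list : List Int) (offspring_fitness_scores : List Int) (out : List Int × List Int) : Decidable (Spec_elitist_replacement population fitness_scores offspring_list offspring_fitness_scores out) := by unfold Spec_elitist_replacement; infer_instance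

-- ===== CLAIM (what is proved, stated in full; the proofs are below) =====
def Claim_equal_elitist_replacement : Prop := ∀ (population : List Int) (fitness_scores : List Int) (offspring_list : List Int) (offspring_fitness_scores : List Int), Dom_elitist_replacement population fitness_scores offspring_list offspring_fitness_scores → Pre_elitist_replacement population fitness_scores offspring_list offspring_fitness_scores → Spec_elitist_replacement population fitness_scores offspring_list offspring_fitness_scores (elitist_replacement population fitness_scores offspring_list offspring_fitness_scores)

-- ===== LEMMAS AND PROOFS =====
-- pvKey: the key A sorts by; pvLex: the lexicographic (key, index) order that A's stable
-- sort realises and that B's repeated first-found strict-min scan also realises.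
lemma insertBy_nil {α : Type} (p : α → α → Bool) (x : α) :
    PySem.List.insertBy p x [] = [x] := rfl

lemma insertBy_cons {α : Type} (p : α → α → Bool) (x y : α) (ys : List α) :
    PySem.List.insertBy p x (y :: ys) =
      if p x y then x :: y :: ys else y :: PySem.List.insertBy p x ys := rfl

lemma insertBy_perm {α : Type} (p : α → α → Bool) (x : α) (ys : List α) :
    (PySem.List.insertBy p x ys).Perm (x :: ys) := by
  induction ys with
  | nil => simp [insertBy_nil]
  | cons y ys ih =>
    rw [insertBy_cons]; split
    · exact List.Perm.refl _
    · exact (ih.cons y).trans (List.Perm.swap x y ys)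

lemma foldl_insertBy_perm {α : Type} (p : α → α → Bool) :
    ∀ (L acc : List α),
      (L.foldl (fun a x => PySem.List.insertBy p x a) acc).Perm (acc ++ L) := by
  intro L
  induction L with
  | nil => intro acc; simp
  | cons x L ih =>
    intro acc
    simp only [List.foldl_cons]
    refine (ih _).trans ?_
    refine (List.Perm.append_right L (insertBy_perm p x acc)).trans ?_
    exact List.perm_middle.symm

lemma insertBy_map {α β : Type} (f : α → β) (p : α → α → Bool) (q : β → β → Bool)
    (h : ∀ a b, q (f a) (f b) = p a b) (x : α) (ys : List α) :
    PySem.List.insertBy q (f x) (ys.map f) = (PySem.List.insertBy p x ys).map f := by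
  induction ys with
  | nil => simp [insertBy_nil]
  | cons y ys ih =>
    simp only [List.map_cons, insertBy_cons, h]
    split <;> simp [ih]

lemma foldl_insertBy_map {α β : Type} (f : α → β) (p : α → α → Bool) (q : β → β → Bool)
    (h : ∀ a b, q (f a) (f b) = p a b) :
    ∀ (L acc : List α),
      ((L.map f).foldl (fun a y => PySem.List.insertBy q y a) (acc.map f)) =
        (L.foldl (fun a x => PySem.List.insertBy p x a) acc).map f := by
  intro L
  induction L with
  | nil => intro acc; simp
  | cons x L ih =>
    intro acc
    simp only [List.map_cons, List.foldl_cons]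
    rw [insertBy_map f p q h x acc]
    exact ih _

def pvKey (fit : List Int) (j : Nat) : Int := fit.getD j 0

def pvLex (fit : List Int) (j k : Nat) : Prop :=
  pvKey fit j < pvKey fit k ∨ (pvKey fit j = pvKey fit k ∧ j < k)

def pvIns (fit : List Int) (x : Nat) (ys : List Nat) : List Nat :=
  PySem.List.insertBy (fun a b => decide (pvKey fit a < pvKey fit b)) x ys

def pvSortIdx (fit : List Int) (m : Nat) : List Nat :=
  (List.range m).foldl (fun acc j => pvIns fit j acc) []

lemma pairwise_insertBy (fit : List Int) (x : Nat) (ys : List Nat)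
    (hys : ys.Pairwise (pvLex fit)) (hlt : ∀ y ∈ ys, y < x) :
    (pvIns fit x ys).Pairwise (pvLex fit) := by
  induction ys with
  | nil => simp [pvIns, insertBy_nil]
  | cons y ys ih =>
    rw [List.pairwise_cons] at hys
    unfold pvIns
    rw [insertBy_cons]
    split
    next h =>
      rw [decide_eq_true_iff] at h
      refine List.Pairwise.cons ?_ (List.Pairwise.cons hys.1 hys.2)
      intro z hz
      rcases List.mem_cons.mp hz with rfl | hz
      · exact Or.inl h
      · rcases hys.1 z hz with h' | ⟨h', _⟩
        · exact Or.inl (h.trans h')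
        · exact Or.inl (h' ▸ h)
    next h =>
      rw [decide_eq_true_iff] at h
      refine List.Pairwise.cons ?_ (ih hys.2 (fun a ha => hlt a (List.mem_cons_of_mem y ha)))
      intro z hz
      rcases (PySem.List.mem_insertBy _ _ _ _).mp hz with rfl | hz
      · by_cases h' : pvKey fit y < pvKey fit z
        · exact Or.inl h'
        · exact Or.inr ⟨by omega, hlt y (List.mem_cons_self)⟩
      · exact hys.1 z hz

lemma foldl_insertBy_pairwise (fit : List Int) :
    ∀ (L acc : List Nat), acc.Pairwise (pvLex fit) → L.Pairwise (· < ·) →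
      (∀ a ∈ acc, ∀ l ∈ L, a < l) →
      (L.foldl (fun a x => pvIns fit x a) acc).Pairwise (pvLex fit) := by
  intro L
  induction L with
  | nil => intro acc h _ _; simpa using h
  | cons x L ih =>
    intro acc hacc hL hcross
    rw [List.pairwise_cons] at hL
    simp only [List.foldl_cons]
    refine ih _ (pairwise_insertBy fit x acc hacc
        (fun a ha => hcross a ha x List.mem_cons_self)) hL.2 ?_
    intro a ha l hl
    rcases (PySem.List.mem_insertBy _ _ _ _).mp ha with rfl | ha
    · exact hL.1 l hl
    · exact hcross a ha l (List.mem_cons_of_mem x hl)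

lemma sortIdx_perm (fit : List Int) (m : Nat) : (pvSortIdx fit m).Perm (List.range m) :=
  (foldl_insertBy_perm _ (List.range m) []).trans (by simp)

lemma sortIdx_length (fit : List Int) (m : Nat) : (pvSortIdx fit m).length = m := by
  simpa using (sortIdx_perm fit m).length_eq

lemma sortIdx_mem (fit : List Int) (m : Nat) (j : Nat) : j ∈ pvSortIdx fit m ↔ j < m := by
  rw [(sortIdx_perm fit m).mem_iff, List.mem_range]

lemma sortIdx_nodup (fit : List Int) (m : Nat) : (pvSortIdx fit m).Nodup :=
  (sortIdx_perm fit m).nodup_iff.mpr (List.nodup_range)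

lemma sortIdx_pairwise (fit : List Int) (m : Nat) : (pvSortIdx fit m).Pairwise (pvLex fit) :=
  foldl_insertBy_pairwise fit (List.range m) [] (by simp) (List.pairwise_lt_range) (by simp)

lemma sortedA_eq (pop fit : List Int) :
    PySem.List.sorted
      ((List.range pop.length).map
        (fun i => (((i : Nat) : Int), PySem.List.pyGetD fit ((i : Nat) : Int) 0,
                   PySem.List.pyGetD pop ((i : Nat) : Int) 0)))
      (fun x => x.2.1) =
      (pvSortIdx fit pop.length).map
        (fun j => (((j : Nat) : Int), pvKey fit j, pop.getD j 0)) := by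
  have hmap : (List.range pop.length).map
      (fun i => (((i : Nat) : Int), PySem.List.pyGetD fit ((i : Nat) : Int) 0,
                 PySem.List.pyGetD pop ((i : Nat) : Int) 0)) =
      (List.range pop.length).map
      (fun j => (((j : Nat) : Int), pvKey fit j, pop.getD j 0)) := by
    simp [pvKey]
  rw [hmap, PySem.List.sorted_eq_foldl_insertBy]
  have := foldl_insertBy_map (fun j : Nat => (((j : Nat) : Int), pvKey fit j, pop.getD j 0))
    (fun a b => decide (pvKey fit a < pvKey fit b))
    (fun a b => decide (a.2.1 < b.2.1)) (fun a b => rfl) (List.range pop.length) []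
  simpa [pvSortIdx, pvIns] using this

lemma scan_succ (fit : List Int) (used : List Bool) (m : Nat) :
    elitist_scan fit used (m + 1) =
      (if !(used.getD m false) &&
          (decide (elitist_scan fit used m < 0) ||
           decide (PySem.List.pyGetD fit ((m : Nat) : Int) 0 <
                   PySem.List.pyGetD fit (elitist_scan fit used m) 0)) then
         ((m : Nat) : Int)
       else elitist_scan fit used m) := by
  unfold elitist_scan
  rw [List.range_succ, List.foldl_append, List.foldl_cons, List.foldl_nil]

lemma scan_spec (fit : List Int) (used : List Bool) (m : Nat) :
    ((∀ j, j < m → used.getD j false = true) ∧ elitist_scan fit used m = -1) ∨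
    (∃ jm, jm < m ∧ elitist_scan fit used m = (jm : Int) ∧ used.getD jm false = false ∧
      ∀ j, j < m → used.getD j false = false → jm = j ∨ pvLex fit jm j) := by
  induction m with
  | zero => exact Or.inl ⟨by omega, rfl⟩
  | succ m ih =>
    rw [scan_succ]
    by_cases hu : used.getD m false
    · -- index m is used: nothing changes
      simp only [hu, Bool.not_true, Bool.false_and]
      rcases ih with ⟨hall, hv⟩ | ⟨jm, hjm, hv, hav, hmin⟩
      · refine Or.inl ⟨fun j hj => ?_, hv⟩
        rcases Nat.lt_succ_iff_lt_or_eq.mp hj with h | h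
        · exact hall j h
        · rw [h]; exact hu
      · refine Or.inr ⟨jm, by omega, hv, hav, fun j hj ha => ?_⟩
        rcases Nat.lt_succ_iff_lt_or_eq.mp hj with h | h
        · exact hmin j h ha
        · rw [h] at ha; rw [ha] at hu; exact absurd hu (by simp)
    · rw [Bool.not_eq_true] at hu
      simp only [hu, Bool.not_false, Bool.true_and]
      rcases ih with ⟨hall, hv⟩ | ⟨jm, hjm, hv, hav, hmin⟩
      · rw [hv]
        norm_num
        refine Or.inr ⟨m, by omega, rfl, hu, fun j hj ha => ?_⟩
        rcases Nat.lt_or_eq_of_le hj with h | h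
        · have h2 : used.getD j false = false := ha
          rw [hall j h] at h2
          exact absurd h2 (by simp)
        · exact Or.inl h.symm
      · rw [hv]
        have hnneg : ¬ ((jm : Int) < 0) := by omega
        by_cases hlt : PySem.List.pyGetD fit ((m : Nat) : Int) 0 < PySem.List.pyGetD fit ((jm : Nat) : Int) 0
        · simp only [hnneg, decide_false, Bool.false_or, hlt, decide_true, if_true]
          have hkm : pvKey fit m < pvKey fit jm := by
            simpa [pvKey] using hlt
          refine Or.inr ⟨m, by omega, rfl, hu, fun j hj ha => ?_⟩
          rcases Nat.lt_succ_iff_lt_or_eq.mp hj with h | h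
          · rcases hmin j h ha with h2 | hlex
            · rw [← h2]; exact Or.inr (Or.inl hkm)
            · rcases hlex with h2 | ⟨h2, _⟩
              · exact Or.inr (Or.inl (hkm.trans h2))
              · exact Or.inr (Or.inl (h2 ▸ hkm))
          · rw [h]; exact Or.inl rfl
        · simp only [hnneg, decide_false, Bool.false_or, hlt, decide_false]
          refine Or.inr ⟨jm, by omega, rfl, hav, fun j hj ha => ?_⟩
          rcases Nat.lt_succ_iff_lt_or_eq.mp hj with h | h
          · exact hmin j h ha
          · have hle : pvKey fit jm ≤ pvKey fit m := by
              simpa [pvKey] using Int.not_lt.mp hlt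
            rw [h]
            rcases lt_or_eq_of_le hle with h2 | h2
            · exact Or.inr (Or.inl h2)
            · exact Or.inr (Or.inr ⟨h2, h ▸ hjm⟩)

lemma pvLex_asymm (fit : List Int) (a b : Nat) (h1 : pvLex fit a b) (h2 : pvLex fit b a) : False := by
  rcases h1 with h1 | ⟨h1, h1'⟩ <;> rcases h2 with h2 | ⟨h2, h2'⟩ <;> omega

lemma scan_picks (fit : List Int) (used : List Bool) (m i : Nat) (hi : i < m)
    (hinv : ∀ j, j < m → used.getD j false = decide (j ∈ (pvSortIdx fit m).take i)) :
    elitist_scan fit used m = (((pvSortIdx fit m)[i]'(by rw [sortIdx_length]; exact hi) : Nat) : Int) := by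
  have hlen : (pvSortIdx fit m).length = m := sortIdx_length fit m
  have hi' : i < (pvSortIdx fit m).length := by omega
  set S := pvSortIdx fit m with hS
  have hq : S[i] < m := (sortIdx_mem fit m _).mp (List.getElem_mem hi')
  have hqt : S[i] ∉ S.take i := by
    intro hmem
    rw [List.mem_take_iff_getElem] at hmem
    obtain ⟨p, hp, hpe⟩ := hmem
    have := (List.Nodup.getElem_inj_iff (sortIdx_nodup fit m)).mp hpe
    omega
  have havq : used.getD S[i] false = false := by
    rw [hinv _ hq]
    simp [hqt]
  rcases scan_spec fit used m with ⟨hall, _⟩ | ⟨jm, hjm, hv, hav, hmin⟩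
  · rw [hall _ hq] at havq
    exact absurd havq (by simp)
  · have hjmS : jm ∈ S := (sortIdx_mem fit m jm).mpr hjm
    rw [List.mem_iff_getElem] at hjmS
    obtain ⟨p, hp, hpe⟩ := hjmS
    have hav' : jm ∉ S.take i := by
      rw [hinv jm hjm] at hav
      simpa using hav
    have hpi : ¬ p < i := by
      intro hpi
      refine hav' ?_
      rw [List.mem_take_iff_getElem]
      exact ⟨p, by omega, hpe⟩
    rcases Nat.eq_or_lt_of_le (Nat.le_of_not_lt hpi) with h | h
    · subst h
      rw [hv, ← hpe]
    · have hlex1 : pvLex fit S[i] jm := by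
        rw [← hpe]
        exact (List.pairwise_iff_getElem.mp (sortIdx_pairwise fit m)) i p hi' hp h
      rcases hmin S[i] hq havq with h2 | h2
      · rw [hv, h2]
      · exact absurd h2 (fun h2 => pvLex_asymm fit _ _ hlex1 h2)

lemma used_set_inv (S : List Nat) (used : List Bool) (m i q : Nat)
    (hlen : used.length = m) (hq : q < m) (hSlen : S.length = m) (hi : i < m)
    (hqS : S[i]'(by omega) = q)
    (hinv : ∀ j, j < m → used.getD j false = decide (j ∈ S.take i)) :
    ∀ j, j < m → (used.set q true).getD j false = decide (j ∈ S.take (i + 1)) := by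
  intro j hj
  have htake : S.take (i + 1) = S.take i ++ [q] := by
    rw [List.take_add_one, List.getElem?_eq_getElem (by omega), hqS]
    rfl
  by_cases hjq : j = q
  · subst hjq
    rw [htake]
    have : (used.set j true).getD j false = true := by
      have : j < used.length := by omega
      simp [List.getD_eq_getElem?_getD, this]
    rw [this]
    simp
  · have hne : (used.set q true).getD j false = used.getD j false := by
      simp [List.getD_eq_getElem?_getD, List.getElem?_set_ne (by omega : q ≠ j)]
    rw [hne, hinv j hj, htake]
    simp [hjq]

lemma loop_eq (pop fit off offF : List Int) (hnm : off.length ≤ pop.length) :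
    ∀ i, i ≤ off.length →
      ∃ np nf reps used,
        (List.range i).foldl
            (elitist_body_A
              ((pvSortIdx fit pop.length).map (fun j => (((j : Nat) : Int), pvKey fit j, pop.getD j 0)))
              off offF)
            (pop, fit, 0) = (np, nf, reps) ∧
        (List.range i).foldl (elitist_body_B pop fit off offF)
            (pop, fit, List.replicate pop.length false) = (np, nf, used) ∧
        used.length = pop.length ∧
        (∀ j, j < pop.length → used.getD j false = decide (j ∈ (pvSortIdx fit pop.length).take i)) := by
  intro i
  induction i with
  | zero =>
    intro _
    refine ⟨pop, fit, 0, List.replicate pop.length false, by simp, by simp, by simp, ?_⟩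
    intro j hj
    simp
  | succ i ih =>
    intro hi1
    obtain ⟨np, nf, reps, used, hA, hB, hlen, hinv⟩ := ih (by omega)
    have hm : i < pop.length := by omega
    have hSlen : (pvSortIdx fit pop.length).length = pop.length := sortIdx_length fit pop.length
    have hi' : i < (pvSortIdx fit pop.length).length := by omega
    set S := pvSortIdx fit pop.length with hS
    set q := S[i]'hi' with hq
    have hqm : q < pop.length := (sortIdx_mem fit pop.length q).mp (List.getElem_mem hi')
    -- unfold one step of each fold
    simp only [List.range_succ, List.foldl_append, List.foldl_cons, List.foldl_nil]
    rw [hA, hB]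
    -- A's step
    have hworstA : PySem.List.pyGetD (S.map (fun j => (((j : Nat) : Int), pvKey fit j, pop.getD j 0)))
        ((i : Nat) : Int) ((0 : Int), (0 : Int), (0 : Int)) = (((q : Nat) : Int), pvKey fit q, pop.getD q 0) := by
      rw [PySem.List.pyGetD_natCast]
      rw [List.getD_eq_getElem _ _ (by simpa using hi')]
      simp [hq]
    -- B's scan
    have hscan : elitist_scan fit used pop.length = ((q : Nat) : Int) := by
      rw [scan_picks fit used pop.length i hm hinv]
    have hfitq : PySem.List.pyGetD fit ((q : Nat) : Int) 0 = pvKey fit q := by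
      simp [pvKey]
    have hinv' := used_set_inv S used pop.length i q hlen hqm hSlen hm rfl hinv
    unfold elitist_body_A elitist_body_B
    simp only [hworstA, hscan, hfitq, PySem.List.pySetD_natCast]
    by_cases hcond : PySem.List.pyGetD offF ((i : Nat) : Int) 0 > pvKey fit q
    · rw [if_pos hcond, if_pos hcond]
      exact ⟨_, _, _, _, rfl, rfl, by simp [hlen], hinv'⟩
    · rw [if_neg hcond, if_neg hcond]
      exact ⟨np, nf, reps, used.set q true, rfl, rfl, by simp [hlen], hinv'⟩

-- ===== VERDICT (by name: the statement is the Claim_ definition above) =====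
theorem elitist_replacement_spec : Claim_equal_elitist_replacement := by
  intro pop fit off offF _ hpre
  unfold Spec_elitist_replacement
  by_cases hn0 : off.length = 0
  · simp [elitist_replacement, elitist_replacement_alt, hn0]
  · rcases hpre with rfl | ⟨hnm, hmf, hno⟩
    · simp at hn0
    · simp only [elitist_replacement, elitist_replacement_alt, if_neg hn0]
      rw [sortedA_eq]
      obtain ⟨np, nf, reps, used, hA, hB, _, _⟩ := loop_eq pop fit off offF hnm off.length le_rfl
      rw [hA, hB]
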